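-- pv_equiv track=rewrite | github.com/anassfresco/Cryptography | cryptographie/vernam.py | vernam_crypt
-- ===== SOURCE A (Python) =====
-- import string
--
-- def vernam_crypt(plaintext,key):
--     alphabet=string.ascii_uppercase
--     plaintext=plaintext.upper()
--     k=0
--     cypher_text=""
--     for i in range(len(plaintext)):
--         if plaintext[i]==" ":
--             cypher_text+=" "
--         else:
--             cypher_text+=alphabet[(alphabet.find(plaintext[i])+key[k])%26]
--             k=k+1
--     return cypher_text
-- ===== SOURCE B (Python) =====
-- import string
--
-- def vernam_crypt(plaintext, key):
--     # Two-pass decomposition: encrypt the non-space letters into a table, then restore the spacing.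
--     alphabet = string.ascii_uppercase
--     up = plaintext.upper()
--     letters = [c for c in up if c != " "]
--     enc = [alphabet[(alphabet.find(c) + key[i]) % 26] for i, c in enumerate(letters)]
--     it = iter(enc)
--     return "".join(" " if c == " " else next(it) for c in up)
-- ===== Notes on version B (the rewrite author's own statement) =====
-- stated objective: alternative
-- what changed: B replaces A's single interleaved pass (counter k, char-by-char string concatenation) by a two-pass decomposition: it first extracts the non-space letters and encrypts them into an intermediate list indexed by enumerate, then rebuilds the string by walking the uppercased text again, re-inserting spaces and consuming the encrypted letters from an iterator.
import Mathlib
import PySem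

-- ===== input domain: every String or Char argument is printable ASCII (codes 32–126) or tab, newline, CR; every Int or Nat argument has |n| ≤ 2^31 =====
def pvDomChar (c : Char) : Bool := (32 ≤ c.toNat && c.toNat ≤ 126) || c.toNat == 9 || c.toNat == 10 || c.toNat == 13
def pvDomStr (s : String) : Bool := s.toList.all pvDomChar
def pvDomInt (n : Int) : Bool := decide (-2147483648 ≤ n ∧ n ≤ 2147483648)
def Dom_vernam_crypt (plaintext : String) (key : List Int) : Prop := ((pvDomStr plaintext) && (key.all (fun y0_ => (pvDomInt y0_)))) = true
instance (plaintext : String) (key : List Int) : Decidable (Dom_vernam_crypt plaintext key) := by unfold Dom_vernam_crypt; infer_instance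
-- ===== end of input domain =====

-- B replaces A's single interleaved counter-loop by a two-pass decomposition (encrypt the
-- non-space letters into an intermediate list, then restore the spacing); same return value.


-- ===== PORT A =====
-- string.ascii_uppercase
def pvAlphabet : List Char := "ABCDEFGHIJKLMNOPQRSTUVWXYZ".toList

-- alphabet[(alphabet.find(c) + kv) % 26]; the index is always in [0, 26) so getD never fires
def pvEnc (c : Char) (kv : Int) : Char :=
  (PySem.List.pyGet? pvAlphabet (PySem.Int.mod (PySem.Chars.find pvAlphabet [c] + kv) 26)).getD ' '

-- loop body of A: state = (k, cypher_text); key[k] is in range on Pre_ (getD never fires there)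
def pvStepA (key : List Int) (st : Int × List Char) (c : Char) : Int × List Char :=
  if c == ' ' then (st.1, st.2 ++ [' '])
  else (st.1 + 1, st.2 ++ [pvEnc c ((PySem.List.pyGet? key st.1).getD 0)])

def vernam_crypt (plaintext : String) (key : List Int) : String :=
  let pt := PySem.Chars.upper plaintext.toList
  let r := pt.foldl (pvStepA key) (0, [])
  String.mk r.2

-- ===== PORT B =====
-- '"".join(" " if c == " " else next(it) for c in up)': consume one encrypted letter per
-- non-space position (the [] branch is unreachable: enc has exactly one entry per letter)
def pvRestore : List Char → List Char → List Char
  | [], _ => []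
  | c :: cs, es =>
    if c == ' ' then ' ' :: pvRestore cs es
    else match es with
      | e :: es' => e :: pvRestore cs es'
      | [] => pvRestore cs []

def vernam_crypt_alt (plaintext : String) (key : List Int) : String :=
  let up := PySem.Chars.upper plaintext.toList
  let letters := up.filter (fun c => c != ' ')
  let enc := (PySem.List.enumerate letters).map
      (fun ic => pvEnc ic.2 ((PySem.List.pyGet? key ic.1).getD 0))
  String.mk (pvRestore up enc)

-- ===== PRECONDITION & SPEC =====
-- Pre_ excludes exactly the inputs on which both Pythons raise IndexError (key shorter than
-- the number of non-space characters); A returns no value there.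
def Pre_vernam_crypt (plaintext : String) (key : List Int) : Prop :=
  ((PySem.Chars.upper plaintext.toList).countP (fun c => c != ' ')) ≤ key.length
instance (plaintext : String) (key : List Int) : Decidable (Pre_vernam_crypt plaintext key) := by
  unfold Pre_vernam_crypt; infer_instance

def pvWitness_vernam_crypt : String × List Int := ("aB c!", [3, -1, 27, 0])

def Spec_vernam_crypt (plaintext : String) (key : List Int) (out : String) : Prop := out = vernam_crypt_alt plaintext key
instance (plaintext : String) (key : List Int) (out : String) : Decidable (Spec_vernam_crypt plaintext key out) := by unfold Spec_vernam_crypt; infer_instance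

-- ===== CLAIM (what is proved, stated in full; the proofs are below) =====
def Claim_equal_vernam_crypt : Prop := ∀ (plaintext : String) (key : List Int), Dom_vernam_crypt plaintext key → Pre_vernam_crypt plaintext key → Spec_vernam_crypt plaintext key (vernam_crypt plaintext key)

-- ===== LEMMAS AND PROOFS =====

-- loop invariant: A's fold from state (s, acc) appends exactly B's restore of the
-- encrypted letters enumerated from s, and advances the counter by the letter count
theorem pvFoldA_eq (key : List Int) :
    ∀ (cs : List Char) (s : Int) (acc : List Char),
      cs.foldl (pvStepA key) (s, acc) =
        (s + (cs.countP (fun c => c != ' ') : Int),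
         acc ++ pvRestore cs ((PySem.List.enumerate (cs.filter (fun c => c != ' ')) s).map
            (fun ic => pvEnc ic.2 ((PySem.List.pyGet? key ic.1).getD 0)))) := by
  intro cs
  induction cs with
  | nil => intro s acc; simp [pvRestore]
  | cons c cs ih =>
    intro s acc
    by_cases hc : c = ' '
    · subst hc
      simp [List.foldl_cons, pvStepA, pvRestore, ih,
        List.append_assoc]
    · have hb : (c != ' ') = true := by simpa using hc
      simp only [List.foldl_cons, pvStepA, beq_iff_eq, hc, if_false, ih, List.countP_cons,
        List.filter_cons, hb, if_true, PySem.List.enumerate_cons, List.map_cons, pvRestore]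
      refine Prod.ext ?_ ?_
      · push_cast; ring
      · simp [List.append_assoc]

theorem vernam_crypt_eq_alt (plaintext : String) (key : List Int) :
    vernam_crypt plaintext key = vernam_crypt_alt plaintext key := by
  simp [vernam_crypt, vernam_crypt_alt, pvFoldA_eq]

-- ===== VERDICT (by name: the statement is the Claim_ definition above) =====
theorem vernam_crypt_spec : Claim_equal_vernam_crypt := by
  intro plaintext key _ _
  unfold Spec_vernam_crypt
  exact vernam_crypt_eq_alt plaintext key
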